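-- pv_equiv track=rewrite | github.com/Cambouu/AdventOfCode2022 | aoc/day18.py | watersheds
-- ===== SOURCE A (Python) =====
-- def singleton_dim(cubes: set[tuple[int]], x_cut=None, y_cut=None, z_cut=None) -> set[tuple[int]]:
--
--     if x_cut is not None:
--         return {(y, z) for x, y, z in cubes if x == x_cut}
--     elif y_cut is not None:
--         return {(x, z) for x, y, z in cubes if y == y_cut}
--     elif z_cut is not None:
--         return {(x, y) for x, y, z in cubes if z == z_cut}
--
-- def watersheds(cubes, x_lim=None, y_lim=None, z_lim=None) -> int:
--     contour_count = 0
--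
--     if x_lim is not None:
--         slice_prev = set()
--         for x_cut in range(x_lim[0], x_lim[1] + 1):
--             slice_current = singleton_dim(cubes, x_cut=x_cut)
--             contour = slice_current - slice_prev
--             contour_count += len(contour)
--             slice_prev = slice_current
--         slice_prev = set()
--         for x_cut in range(x_lim[1], x_lim[0] - 1, -1):
--             slice_current = singleton_dim(cubes, x_cut=x_cut)
--             contour = slice_current - slice_prev
--             contour_count += len(contour)
--             slice_prev = slice_current
--
--     elif y_lim is not None:
--         slice_prev = set()
--         for y_cut in range(y_lim[0], y_lim[1] + 1):
--             slice_current = singleton_dim(cubes, y_cut=y_cut)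
--             contour = slice_current - slice_prev
--             contour_count += len(contour)
--             slice_prev = slice_current
--         slice_prev = set()
--         for y_cut in range(y_lim[1], y_lim[0] - 1, -1):
--             slice_current = singleton_dim(cubes, y_cut=y_cut)
--             contour = slice_current - slice_prev
--             contour_count += len(contour)
--             slice_prev = slice_current
--
--     elif z_lim is not None:
--         slice_prev = set()
--         for z_cut in range(z_lim[0], z_lim[1] + 1):
--             slice_current = singleton_dim(cubes, z_cut=z_cut)
--             contour = slice_current - slice_prev
--             contour_count += len(contour)
--             slice_prev = slice_current
--         slice_prev = set()
--         for z_cut in range(z_lim[1], z_lim[0] - 1, -1):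
--             slice_current = singleton_dim(cubes, z_cut=z_cut)
--             contour = slice_current - slice_prev
--             contour_count += len(contour)
--             slice_prev = slice_current
--
--     return contour_count
-- ===== SOURCE B (Python) =====
-- def watersheds(cubes, x_lim=None, y_lim=None, z_lim=None) -> int:
--     # Bucket cubes by cut coordinate in ONE pass, then walk the slice range once,
--     # counting both the ascending and the descending contour at each cut.
--     if x_lim is not None:
--         lim, axis = x_lim, 0
--     elif y_lim is not None:
--         lim, axis = y_lim, 1
--     elif z_lim is not None:
--         lim, axis = z_lim, 2
--     else:
--         return 0
--     lo, hi = lim[0], lim[1]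
--     if hi < lo:
--         return 0
--     buckets = {}
--     for c in cubes:
--         cut = c[axis]
--         if lo <= cut <= hi:
--             pair = tuple(v for i, v in enumerate(c) if i != axis)
--             buckets.setdefault(cut, set()).add(pair)
--     total = 0
--     empty = set()
--     for cut in range(lo, hi + 1):
--         cur = buckets.get(cut, empty)
--         total += len(cur - buckets.get(cut - 1, empty))
--         total += len(cur - buckets.get(cut + 1, empty))
--     return total
-- ===== Notes on version B (the rewrite author's own statement) =====
-- stated objective: alternative
-- what changed: B buckets the cubes by their cut coordinate into a dict of projected-pair sets in one pass and then walks the slice range once, reading each slice and both neighbour slices from the buckets, instead of A's two stateful passes that re-scan the entire cube list at every cut; it trades A's per-cut rescans for one bucketing pass (O(n+L) vs O(L*n), not measurably faster on the timing inputs, whose slice range is small).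
import Mathlib
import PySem

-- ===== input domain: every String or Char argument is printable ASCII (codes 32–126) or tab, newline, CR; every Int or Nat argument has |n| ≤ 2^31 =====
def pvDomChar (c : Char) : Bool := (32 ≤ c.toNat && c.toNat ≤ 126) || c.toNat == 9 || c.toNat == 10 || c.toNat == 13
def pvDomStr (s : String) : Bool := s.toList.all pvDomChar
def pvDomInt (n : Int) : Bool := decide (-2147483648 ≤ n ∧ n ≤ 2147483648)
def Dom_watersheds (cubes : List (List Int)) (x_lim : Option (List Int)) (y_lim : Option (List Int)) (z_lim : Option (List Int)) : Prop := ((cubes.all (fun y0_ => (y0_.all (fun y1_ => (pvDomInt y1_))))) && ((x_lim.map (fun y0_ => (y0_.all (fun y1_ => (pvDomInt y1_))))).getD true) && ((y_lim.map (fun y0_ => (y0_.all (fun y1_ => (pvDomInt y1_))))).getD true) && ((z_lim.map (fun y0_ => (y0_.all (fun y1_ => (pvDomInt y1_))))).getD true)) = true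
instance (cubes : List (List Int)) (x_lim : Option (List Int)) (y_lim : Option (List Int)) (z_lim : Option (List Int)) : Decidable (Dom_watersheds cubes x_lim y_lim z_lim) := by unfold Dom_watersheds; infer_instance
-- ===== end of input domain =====

-- B buckets the cubes by cut coordinate in one pass and then walks the slice range once,
-- instead of A's two stateful passes that re-scan the whole cube list at every cut.

-- ===== PORT A =====
-- Python's singleton_dim returns None when no cut is given (unreachable from watersheds); surfaced as Option.
-- A cube not of length 3 raises ValueError on unpacking in Python; here such cubes are dropped — those
-- inputs are excluded by Pre_watersheds whenever a slice is actually taken.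
def singleton_dim (cubes : List (List Int)) (x_cut : Option Int) (y_cut : Option Int) (z_cut : Option Int) : Option (PySem.Set (Int × Int)) :=
  match x_cut with
  | some v => some (PySem.Set.ofList (cubes.filterMap (fun c =>
      match c with
      | [_x, _y, _z] => if _x = v then some (_y, _z) else none
      | _ => none)))
  | none =>
    match y_cut with
    | some v => some (PySem.Set.ofList (cubes.filterMap (fun c =>
        match c with
        | [_x, _y, _z] => if _y = v then some (_x, _z) else none
        | _ => none)))
    | none =>
      match z_cut with
      | some v => some (PySem.Set.ofList (cubes.filterMap (fun c =>
          match c with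
          | [_x, _y, _z] => if _z = v then some (_x, _y) else none
          | _ => none)))
      | none => none

-- lim[0] / lim[1] are PySem.List.pyGetD lim 0 0 / 1 0: exact since Pre_watersheds gives 2 ≤ length.
-- '.getD PySem.Set.empty' discharges singleton_dim's none branch, unreachable here (a cut is always passed).
-- Each 'for … : slice_current = …; contour_count += len(slice_current - slice_prev); slice_prev = slice_current'
-- is a foldl over (contour_count, slice_prev); the second loop starts from the first loop's count and an empty slice_prev.
def watersheds (cubes : List (List Int)) (x_lim : Option (List Int)) (y_lim : Option (List Int)) (z_lim : Option (List Int)) : Int :=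
  match x_lim with
  | some l =>
      ((PySem.List.pyRange (PySem.List.pyGetD l 1 0) (PySem.List.pyGetD l 0 0 - 1) (-1)).foldl
        (fun st v => (st.1 + PySem.Set.len (PySem.Set.diff ((singleton_dim cubes (some v) none none).getD PySem.Set.empty) st.2),
                      (singleton_dim cubes (some v) none none).getD PySem.Set.empty))
        (((PySem.List.pyRange (PySem.List.pyGetD l 0 0) (PySem.List.pyGetD l 1 0 + 1) 1).foldl
            (fun st v => (st.1 + PySem.Set.len (PySem.Set.diff ((singleton_dim cubes (some v) none none).getD PySem.Set.empty) st.2),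
                          (singleton_dim cubes (some v) none none).getD PySem.Set.empty))
            (0, PySem.Set.empty)).1, PySem.Set.empty)).1
  | none =>
    match y_lim with
    | some l =>
        ((PySem.List.pyRange (PySem.List.pyGetD l 1 0) (PySem.List.pyGetD l 0 0 - 1) (-1)).foldl
          (fun st v => (st.1 + PySem.Set.len (PySem.Set.diff ((singleton_dim cubes none (some v) none).getD PySem.Set.empty) st.2),
                        (singleton_dim cubes none (some v) none).getD PySem.Set.empty))
          (((PySem.List.pyRange (PySem.List.pyGetD l 0 0) (PySem.List.pyGetD l 1 0 + 1) 1).foldl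
              (fun st v => (st.1 + PySem.Set.len (PySem.Set.diff ((singleton_dim cubes none (some v) none).getD PySem.Set.empty) st.2),
                            (singleton_dim cubes none (some v) none).getD PySem.Set.empty))
              (0, PySem.Set.empty)).1, PySem.Set.empty)).1
    | none =>
      match z_lim with
      | some l =>
          ((PySem.List.pyRange (PySem.List.pyGetD l 1 0) (PySem.List.pyGetD l 0 0 - 1) (-1)).foldl
            (fun st v => (st.1 + PySem.Set.len (PySem.Set.diff ((singleton_dim cubes none none (some v)).getD PySem.Set.empty) st.2),
                          (singleton_dim cubes none none (some v)).getD PySem.Set.empty))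
            (((PySem.List.pyRange (PySem.List.pyGetD l 0 0) (PySem.List.pyGetD l 1 0 + 1) 1).foldl
                (fun st v => (st.1 + PySem.Set.len (PySem.Set.diff ((singleton_dim cubes none none (some v)).getD PySem.Set.empty) st.2),
                              (singleton_dim cubes none none (some v)).getD PySem.Set.empty))
                (0, PySem.Set.empty)).1, PySem.Set.empty)).1
      | none => 0

-- ===== PORT B =====
-- pair = tuple(v for i, v in enumerate(c) if i != axis), for the three concrete axes of Source B
def projPair (c : List Int) (axis : Int) : Int × Int :=
  if axis = 0 then (PySem.List.pyGetD c 1 0, PySem.List.pyGetD c 2 0)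
  else if axis = 1 then (PySem.List.pyGetD c 0 0, PySem.List.pyGetD c 2 0)
  else (PySem.List.pyGetD c 0 0, PySem.List.pyGetD c 1 0)

-- the shared body of Source B after the axis/limit selection: bucket cubes by cut, then one walk of the range
def axisCount (cubes : List (List Int)) (l : List Int) (axis : Int) : Int :=
  if PySem.List.pyGetD l 1 0 < PySem.List.pyGetD l 0 0 then 0
  else
    (PySem.List.pyRange (PySem.List.pyGetD l 0 0) (PySem.List.pyGetD l 1 0 + 1) 1).foldl
      (fun total cut =>
        total
          + PySem.Set.len (PySem.Set.diff
              ((cubes.foldl (fun d c =>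
                  if PySem.List.pyGetD l 0 0 ≤ PySem.List.pyGetD c axis 0 ∧ PySem.List.pyGetD c axis 0 ≤ PySem.List.pyGetD l 1 0 then
                    d.insert (PySem.List.pyGetD c axis 0)
                      (PySem.Set.add (d.getD (PySem.List.pyGetD c axis 0) PySem.Set.empty) (projPair c axis))
                  else d) PySem.Dict.empty).getD cut PySem.Set.empty)
              ((cubes.foldl (fun d c =>
                  if PySem.List.pyGetD l 0 0 ≤ PySem.List.pyGetD c axis 0 ∧ PySem.List.pyGetD c axis 0 ≤ PySem.List.pyGetD l 1 0 then
                    d.insert (PySem.List.pyGetD c axis 0)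
                      (PySem.Set.add (d.getD (PySem.List.pyGetD c axis 0) PySem.Set.empty) (projPair c axis))
                  else d) PySem.Dict.empty).getD (cut - 1) PySem.Set.empty))
          + PySem.Set.len (PySem.Set.diff
              ((cubes.foldl (fun d c =>
                  if PySem.List.pyGetD l 0 0 ≤ PySem.List.pyGetD c axis 0 ∧ PySem.List.pyGetD c axis 0 ≤ PySem.List.pyGetD l 1 0 then
                    d.insert (PySem.List.pyGetD c axis 0)
                      (PySem.Set.add (d.getD (PySem.List.pyGetD c axis 0) PySem.Set.empty) (projPair c axis))
                  else d) PySem.Dict.empty).getD cut PySem.Set.empty)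
              ((cubes.foldl (fun d c =>
                  if PySem.List.pyGetD l 0 0 ≤ PySem.List.pyGetD c axis 0 ∧ PySem.List.pyGetD c axis 0 ≤ PySem.List.pyGetD l 1 0 then
                    d.insert (PySem.List.pyGetD c axis 0)
                      (PySem.Set.add (d.getD (PySem.List.pyGetD c axis 0) PySem.Set.empty) (projPair c axis))
                  else d) PySem.Dict.empty).getD (cut + 1) PySem.Set.empty)))
      0

def watersheds_alt (cubes : List (List Int)) (x_lim : Option (List Int)) (y_lim : Option (List Int)) (z_lim : Option (List Int)) : Int :=
  match x_lim with
  | some l => axisCount cubes l 0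
  | none =>
    match y_lim with
    | some l => axisCount cubes l 1
    | none =>
      match z_lim with
      | some l => axisCount cubes l 2
      | none => 0

-- ===== PRECONDITION & SPEC =====
-- Pre_ excludes exactly the inputs where Python A raises: a selected limit list shorter than 2
-- (IndexError on lim[1]) and, when the slice range is nonempty, a cube not of length 3
-- (ValueError on unpacking). A returns on every other input.
def limPre (cubes : List (List Int)) (l : List Int) : Prop :=
  2 ≤ l.length ∧ (l.getD 0 0 ≤ l.getD 1 0 → ∀ c ∈ cubes, c.length = 3)

def Pre_watersheds (cubes : List (List Int)) (x_lim : Option (List Int)) (y_lim : Option (List Int)) (z_lim : Option (List Int)) : Prop :=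
  ∀ l ∈ (x_lim.or y_lim).or z_lim, limPre cubes l

instance (cubes : List (List Int)) (x_lim : Option (List Int)) (y_lim : Option (List Int)) (z_lim : Option (List Int)) : Decidable (Pre_watersheds cubes x_lim y_lim z_lim) := by unfold Pre_watersheds limPre; infer_instance

def pvWitness_watersheds : List (List Int) × Option (List Int) × Option (List Int) × Option (List Int) :=
  ([[0, 0, 0], [1, 0, 0], [1, 2, 2]], some [0, 1], none, none)

def Spec_watersheds (cubes : List (List Int)) (x_lim : Option (List Int)) (y_lim : Option (List Int)) (z_lim : Option (List Int)) (out : Int) : Prop := out = watersheds_alt cubes x_lim y_lim z_lim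
instance (cubes : List (List Int)) (x_lim : Option (List Int)) (y_lim : Option (List Int)) (z_lim : Option (List Int)) (out : Int) : Decidable (Spec_watersheds cubes x_lim y_lim z_lim out) := by unfold Spec_watersheds; infer_instance

-- ===== CLAIM (what is proved, stated in full; the proofs are below) =====
def Claim_equal_watersheds : Prop := ∀ (cubes : List (List Int)) (x_lim : Option (List Int)) (y_lim : Option (List Int)) (z_lim : Option (List Int)), Dom_watersheds cubes x_lim y_lim z_lim → Pre_watersheds cubes x_lim y_lim z_lim → Spec_watersheds cubes x_lim y_lim z_lim (watersheds cubes x_lim y_lim z_lim)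

-- ===== LEMMAS AND PROOFS =====

-- two Nodup sets with the same members (and likewise the subtracted sets) have equal-sized differences
lemma len_diff_congr {β : Type} [BEq β] [LawfulBEq β] {s₁ s₂ t₁ t₂ : PySem.Set β}
    (hn₁ : s₁.Nodup) (hn₂ : s₂.Nodup)
    (hs : ∀ x, x ∈ s₁ ↔ x ∈ s₂) (ht : ∀ x, x ∈ t₁ ↔ x ∈ t₂) :
    PySem.Set.len (s₁.diff t₁) = PySem.Set.len (s₂.diff t₂) := by
  have hperm : (s₁.diff t₁).Perm (s₂.diff t₂) := by
    rw [List.perm_ext_iff_of_nodup (PySem.Set.nodup_diff _ _ hn₁) (PySem.Set.nodup_diff _ _ hn₂)]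
    intro x
    simp only [PySem.Set.mem_diff, hs x, ht x]
  simp [PySem.Set.len, hperm.length_eq]

-- the ascending stateful pass is the sum over the range of |slice v − slice (v-1)| (empty slice below a)
lemma ascFoldAux {β : Type} [BEq β] [LawfulBEq β] (g : Int → PySem.Set β) (b : Int) :
    ∀ (n : Nat) (a acc : Int) (p : PySem.Set β), (b - a).toNat = n →
    ((PySem.List.pyRange a b 1).foldl
        (fun st v => (st.1 + PySem.Set.len (PySem.Set.diff (g v) st.2), g v)) (acc, p)).1
      = acc + ((PySem.List.pyRange a b 1).map
          (fun v => PySem.Set.len (PySem.Set.diff (g v) (if v ≤ a then p else g (v - 1))))).sum := by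
  intro n
  induction n with
  | zero =>
    intro a acc p h
    rw [PySem.List.pyRange_one_eq_nil (by omega)]
    simp
  | succ n ih =>
    intro a acc p h
    rw [PySem.List.pyRange_one_cons (by omega)]
    simp only [List.foldl_cons, List.map_cons, List.sum_cons]
    rw [ih (a + 1) (acc + PySem.Set.len (PySem.Set.diff (g a) p)) (g a) (by omega)]
    rw [List.map_congr_left (l := PySem.List.pyRange (a + 1) b 1)
      (f := fun v => PySem.Set.len (PySem.Set.diff (g v) (if v ≤ a + 1 then g a else g (v - 1))))
      (g := fun v => PySem.Set.len (PySem.Set.diff (g v) (if v ≤ a then p else g (v - 1))))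
      (by
        intro v hv
        have hv' := (PySem.List.mem_pyRange_one).mp hv
        by_cases hva : v = a + 1
        · subst hva; simp [show ¬(a + 1 ≤ a) by omega, show a + 1 - 1 = a by omega]
        · have h1 : ¬ v ≤ a + 1 := by omega
          have h2 : ¬ v ≤ a := by omega
          simp [h1, h2])]
    simp
    ring

lemma ascFold_fst {β : Type} [BEq β] [LawfulBEq β] (g : Int → PySem.Set β) (a b acc : Int) (p : PySem.Set β) :
    ((PySem.List.pyRange a b 1).foldl
        (fun st v => (st.1 + PySem.Set.len (PySem.Set.diff (g v) st.2), g v)) (acc, p)).1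
      = acc + ((PySem.List.pyRange a b 1).map
          (fun v => PySem.Set.len (PySem.Set.diff (g v) (if v ≤ a then p else g (v - 1))))).sum :=
  ascFoldAux g b (b - a).toNat a acc p rfl

-- the descending stateful pass, dually: |slice v − slice (v+1)| (empty slice above b)
lemma descFoldAux {β : Type} [BEq β] [LawfulBEq β] (g : Int → PySem.Set β) (a : Int) :
    ∀ (n : Nat) (b acc : Int) (p : PySem.Set β), (b + 1 - a).toNat = n →
    ((PySem.List.pyRange b (a - 1) (-1)).foldl
        (fun st v => (st.1 + PySem.Set.len (PySem.Set.diff (g v) st.2), g v)) (acc, p)).1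
      = acc + ((PySem.List.pyRange b (a - 1) (-1)).map
          (fun v => PySem.Set.len (PySem.Set.diff (g v) (if b ≤ v then p else g (v + 1))))).sum := by
  intro n
  induction n with
  | zero =>
    intro b acc p h
    rw [PySem.List.pyRange_neg_one_eq_nil (by omega)]
    simp
  | succ n ih =>
    intro b acc p h
    rw [PySem.List.pyRange_neg_one_cons (by omega)]
    simp only [List.foldl_cons, List.map_cons, List.sum_cons]
    rw [ih (b - 1) (acc + PySem.Set.len (PySem.Set.diff (g b) p)) (g b) (by omega)]
    rw [List.map_congr_left (l := PySem.List.pyRange (b - 1) (a - 1) (-1))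
      (f := fun v => PySem.Set.len (PySem.Set.diff (g v) (if b - 1 ≤ v then g b else g (v + 1))))
      (g := fun v => PySem.Set.len (PySem.Set.diff (g v) (if b ≤ v then p else g (v + 1))))
      (by
        intro v hv
        have hv' := (PySem.List.mem_pyRange_neg_one).mp hv
        by_cases hvb : v = b - 1
        · subst hvb; simp [show ¬(b ≤ b - 1) by omega, show b - 1 + 1 = b by omega]
        · have h1 : ¬ (b - 1 ≤ v) := by omega
          have h2 : ¬ (b ≤ v) := by omega
          simp [h1, h2])]
    simp
    ring

lemma descFold_fst {β : Type} [BEq β] [LawfulBEq β] (g : Int → PySem.Set β) (a b acc : Int) (p : PySem.Set β) :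
    ((PySem.List.pyRange b (a - 1) (-1)).foldl
        (fun st v => (st.1 + PySem.Set.len (PySem.Set.diff (g v) st.2), g v)) (acc, p)).1
      = acc + ((PySem.List.pyRange b (a - 1) (-1)).map
          (fun v => PySem.Set.len (PySem.Set.diff (g v) (if b ≤ v then p else g (v + 1))))).sum :=
  descFoldAux g a (b + 1 - a).toNat b acc p rfl

-- membership in the bucket dict built by B's single pass
lemma mem_bucketsAux (lo hi : Int) (key : List Int → Int) (pr : List Int → Int × Int) :
    ∀ (cubes : List (List Int)) (d : PySem.Dict Int (PySem.Set (Int × Int))) (u : Int) (p : Int × Int),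
    (p ∈ (cubes.foldl (fun d c =>
        if lo ≤ key c ∧ key c ≤ hi then
          d.insert (key c) (PySem.Set.add (d.getD (key c) PySem.Set.empty) (pr c))
        else d) d).getD u PySem.Set.empty
      ↔ p ∈ d.getD u PySem.Set.empty ∨ (lo ≤ u ∧ u ≤ hi ∧ ∃ c ∈ cubes, key c = u ∧ pr c = p)) := by
  intro cubes
  induction cubes with
  | nil => intro d u p; simp
  | cons c cs ih =>
    intro d u p
    have hstep : p ∈ ((if lo ≤ key c ∧ key c ≤ hi then
          d.insert (key c) (PySem.Set.add (d.getD (key c) PySem.Set.empty) (pr c))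
        else d).getD u PySem.Set.empty)
        ↔ (p ∈ d.getD u PySem.Set.empty ∨ (lo ≤ u ∧ u ≤ hi ∧ key c = u ∧ pr c = p)) := by
      by_cases hc : lo ≤ key c ∧ key c ≤ hi
      · rw [if_pos hc]
        by_cases hu : u = key c
        · subst hu
          rw [PySem.Dict.getD_insert, if_pos rfl, PySem.Set.mem_add]
          constructor
          · rintro (h | h)
            · exact Or.inl h
            · exact Or.inr ⟨hc.1, hc.2, rfl, h.symm⟩
          · rintro (h | ⟨_, _, _, hp⟩)
            · exact Or.inl h
            · exact Or.inr hp.symm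
        · rw [PySem.Dict.getD_insert, if_neg hu]
          constructor
          · exact Or.inl
          · rintro (h | ⟨_, _, hk, _⟩)
            · exact h
            · exact absurd hk.symm hu
      · rw [if_neg hc]
        constructor
        · exact Or.inl
        · rintro (h | ⟨h1, h2, hk, _⟩)
          · exact h
          · subst hk; exact absurd ⟨h1, h2⟩ hc
    rw [List.foldl_cons, ih, hstep]
    constructor
    · rintro ((h | ⟨h1, h2, hk, hp⟩) | ⟨h1, h2, c', hc', hk, hp⟩)
      · exact Or.inl h
      · exact Or.inr ⟨h1, h2, c, List.mem_cons_self, hk, hp⟩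
      · exact Or.inr ⟨h1, h2, c', List.mem_cons_of_mem c hc', hk, hp⟩
    · rintro (h | ⟨h1, h2, c', hc', hk, hp⟩)
      · exact Or.inl (Or.inl h)
      · rcases List.mem_cons.mp hc' with rfl | hcs
        · exact Or.inl (Or.inr ⟨h1, h2, hk, hp⟩)
        · exact Or.inr ⟨h1, h2, c', hcs, hk, hp⟩

lemma nodup_bucketsAux (lo hi : Int) (key : List Int → Int) (pr : List Int → Int × Int) :
    ∀ (cubes : List (List Int)) (d : PySem.Dict Int (PySem.Set (Int × Int))),
    (∀ u, (d.getD u PySem.Set.empty).Nodup) →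
    ∀ u, ((cubes.foldl (fun d c =>
        if lo ≤ key c ∧ key c ≤ hi then
          d.insert (key c) (PySem.Set.add (d.getD (key c) PySem.Set.empty) (pr c))
        else d) d).getD u PySem.Set.empty).Nodup := by
  intro cubes
  induction cubes with
  | nil => intro d hd u; simpa using hd u
  | cons c cs ih =>
    intro d hd u
    rw [List.foldl_cons]
    apply ih
    intro u'
    by_cases hc : lo ≤ key c ∧ key c ≤ hi
    · rw [if_pos hc, PySem.Dict.getD_insert]
      by_cases hu : u' = key c
      · rw [if_pos hu]; exact PySem.Set.nodup_add _ _ (hd _)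
      · rw [if_neg hu]; exact hd u'
    · rw [if_neg hc]; exact hd u'

-- the master lemma: A's two stateful passes equal B's bucketed single walk, for any axis
-- characterised by (key, pr) with A's slice function Sl
lemma branch_eq (cubes : List (List Int)) (key : List Int → Int) (pr : List Int → Int × Int)
    (Sl : Int → PySem.Set (Int × Int)) (lo hi : Int)
    (hS : ∀ v p, p ∈ Sl v ↔ ∃ c ∈ cubes, key c = v ∧ pr c = p)
    (hN : ∀ v, (Sl v).Nodup) :
    ((PySem.List.pyRange hi (lo - 1) (-1)).foldl
        (fun st v => (st.1 + PySem.Set.len (PySem.Set.diff (Sl v) st.2), Sl v))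
        (((PySem.List.pyRange lo (hi + 1) 1).foldl
            (fun st v => (st.1 + PySem.Set.len (PySem.Set.diff (Sl v) st.2), Sl v))
            (0, PySem.Set.empty)).1, PySem.Set.empty)).1
      = (PySem.List.pyRange lo (hi + 1) 1).foldl
          (fun total cut =>
            total
              + PySem.Set.len (PySem.Set.diff
                  ((cubes.foldl (fun d c =>
                      if lo ≤ key c ∧ key c ≤ hi then
                        d.insert (key c) (PySem.Set.add (d.getD (key c) PySem.Set.empty) (pr c))
                      else d) PySem.Dict.empty).getD cut PySem.Set.empty)
                  ((cubes.foldl (fun d c =>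
                      if lo ≤ key c ∧ key c ≤ hi then
                        d.insert (key c) (PySem.Set.add (d.getD (key c) PySem.Set.empty) (pr c))
                      else d) PySem.Dict.empty).getD (cut - 1) PySem.Set.empty))
              + PySem.Set.len (PySem.Set.diff
                  ((cubes.foldl (fun d c =>
                      if lo ≤ key c ∧ key c ≤ hi then
                        d.insert (key c) (PySem.Set.add (d.getD (key c) PySem.Set.empty) (pr c))
                      else d) PySem.Dict.empty).getD cut PySem.Set.empty)
                  ((cubes.foldl (fun d c =>
                      if lo ≤ key c ∧ key c ≤ hi then
                        d.insert (key c) (PySem.Set.add (d.getD (key c) PySem.Set.empty) (pr c))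
                      else d) PySem.Dict.empty).getD (cut + 1) PySem.Set.empty)))
          0 := by
  have bmem : ∀ u p, (p ∈ (cubes.foldl (fun d c =>
      if lo ≤ key c ∧ key c ≤ hi then
        d.insert (key c) (PySem.Set.add (d.getD (key c) PySem.Set.empty) (pr c))
      else d) PySem.Dict.empty).getD u PySem.Set.empty
      ↔ (lo ≤ u ∧ u ≤ hi ∧ ∃ c ∈ cubes, key c = u ∧ pr c = p)) := by
    intro u p
    rw [mem_bucketsAux lo hi key pr cubes PySem.Dict.empty u p]
    simp [PySem.Dict.getD_empty, PySem.Set.empty]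
  have bnod : ∀ u, ((cubes.foldl (fun d c =>
      if lo ≤ key c ∧ key c ≤ hi then
        d.insert (key c) (PySem.Set.add (d.getD (key c) PySem.Set.empty) (pr c))
      else d) PySem.Dict.empty).getD u PySem.Set.empty).Nodup := by
    apply nodup_bucketsAux
    intro u; simp [PySem.Dict.getD_empty, PySem.Set.empty]
  rw [descFold_fst, ascFold_fst]
  rw [show (fun (total : Int) (cut : Int) =>
        total
          + PySem.Set.len (PySem.Set.diff
              ((cubes.foldl (fun d c =>
                  if lo ≤ key c ∧ key c ≤ hi then
                    d.insert (key c) (PySem.Set.add (d.getD (key c) PySem.Set.empty) (pr c))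
                  else d) PySem.Dict.empty).getD cut PySem.Set.empty)
              ((cubes.foldl (fun d c =>
                  if lo ≤ key c ∧ key c ≤ hi then
                    d.insert (key c) (PySem.Set.add (d.getD (key c) PySem.Set.empty) (pr c))
                  else d) PySem.Dict.empty).getD (cut - 1) PySem.Set.empty))
          + PySem.Set.len (PySem.Set.diff
              ((cubes.foldl (fun d c =>
                  if lo ≤ key c ∧ key c ≤ hi then
                    d.insert (key c) (PySem.Set.add (d.getD (key c) PySem.Set.empty) (pr c))
                  else d) PySem.Dict.empty).getD cut PySem.Set.empty)
              ((cubes.foldl (fun d c =>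
                  if lo ≤ key c ∧ key c ≤ hi then
                    d.insert (key c) (PySem.Set.add (d.getD (key c) PySem.Set.empty) (pr c))
                  else d) PySem.Dict.empty).getD (cut + 1) PySem.Set.empty)))
      = (fun (total : Int) (cut : Int) =>
        total + (PySem.Set.len (PySem.Set.diff
              ((cubes.foldl (fun d c =>
                  if lo ≤ key c ∧ key c ≤ hi then
                    d.insert (key c) (PySem.Set.add (d.getD (key c) PySem.Set.empty) (pr c))
                  else d) PySem.Dict.empty).getD cut PySem.Set.empty)
              ((cubes.foldl (fun d c =>
                  if lo ≤ key c ∧ key c ≤ hi then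
                    d.insert (key c) (PySem.Set.add (d.getD (key c) PySem.Set.empty) (pr c))
                  else d) PySem.Dict.empty).getD (cut - 1) PySem.Set.empty))
          + PySem.Set.len (PySem.Set.diff
              ((cubes.foldl (fun d c =>
                  if lo ≤ key c ∧ key c ≤ hi then
                    d.insert (key c) (PySem.Set.add (d.getD (key c) PySem.Set.empty) (pr c))
                  else d) PySem.Dict.empty).getD cut PySem.Set.empty)
              ((cubes.foldl (fun d c =>
                  if lo ≤ key c ∧ key c ≤ hi then
                    d.insert (key c) (PySem.Set.add (d.getD (key c) PySem.Set.empty) (pr c))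
                  else d) PySem.Dict.empty).getD (cut + 1) PySem.Set.empty))))
      from funext₂ (fun total cut => by ring)]
  rw [PySem.List.foldl_add]
  rw [PySem.List.sum_map_add_int]
  rw [PySem.List.pyRange_neg_one_eq_reverse hi (lo - 1), show lo - 1 + 1 = lo from by ring]
  rw [List.map_reverse, List.sum_reverse]
  have e1 : List.map (fun v => PySem.Set.len (PySem.Set.diff (Sl v)
        (if v ≤ lo then PySem.Set.empty else Sl (v - 1)))) (PySem.List.pyRange lo (hi + 1) 1)
      = List.map (fun cut => PySem.Set.len (PySem.Set.diff
          ((cubes.foldl (fun d c =>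
              if lo ≤ key c ∧ key c ≤ hi then
                d.insert (key c) (PySem.Set.add (d.getD (key c) PySem.Set.empty) (pr c))
              else d) PySem.Dict.empty).getD cut PySem.Set.empty)
          ((cubes.foldl (fun d c =>
              if lo ≤ key c ∧ key c ≤ hi then
                d.insert (key c) (PySem.Set.add (d.getD (key c) PySem.Set.empty) (pr c))
              else d) PySem.Dict.empty).getD (cut - 1) PySem.Set.empty)))
          (PySem.List.pyRange lo (hi + 1) 1) := by
    apply List.map_congr_left
    intro v hv
    have hv' := (PySem.List.mem_pyRange_one).mp hv
    apply len_diff_congr (hN v) (bnod v)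
    · intro x
      rw [hS v x, bmem v x]
      constructor
      · intro h; exact ⟨hv'.1, by omega, h⟩
      · intro h; exact h.2.2
    · by_cases hvlo : v ≤ lo
      · intro x
        rw [if_pos hvlo, bmem (v - 1) x]
        simp only [PySem.Set.empty]
        constructor
        · intro h; cases h
        · intro h; omega
      · intro x
        rw [if_neg hvlo, hS (v - 1) x, bmem (v - 1) x]
        constructor
        · intro h; exact ⟨by omega, by omega, h⟩
        · intro h; exact h.2.2
  have e2 : List.map (fun v => PySem.Set.len (PySem.Set.diff (Sl v)
        (if hi ≤ v then PySem.Set.empty else Sl (v + 1)))) (PySem.List.pyRange lo (hi + 1) 1)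
      = List.map (fun cut => PySem.Set.len (PySem.Set.diff
          ((cubes.foldl (fun d c =>
              if lo ≤ key c ∧ key c ≤ hi then
                d.insert (key c) (PySem.Set.add (d.getD (key c) PySem.Set.empty) (pr c))
              else d) PySem.Dict.empty).getD cut PySem.Set.empty)
          ((cubes.foldl (fun d c =>
              if lo ≤ key c ∧ key c ≤ hi then
                d.insert (key c) (PySem.Set.add (d.getD (key c) PySem.Set.empty) (pr c))
              else d) PySem.Dict.empty).getD (cut + 1) PySem.Set.empty)))
          (PySem.List.pyRange lo (hi + 1) 1) := by
    apply List.map_congr_left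
    intro v hv
    have hv' := (PySem.List.mem_pyRange_one).mp hv
    apply len_diff_congr (hN v) (bnod v)
    · intro x
      rw [hS v x, bmem v x]
      constructor
      · intro h; exact ⟨hv'.1, by omega, h⟩
      · intro h; exact h.2.2
    · by_cases hvhi : hi ≤ v
      · intro x
        rw [if_pos hvhi, bmem (v + 1) x]
        simp only [PySem.Set.empty]
        constructor
        · intro h; cases h
        · intro h; omega
      · intro x
        rw [if_neg hvhi, hS (v + 1) x, bmem (v + 1) x]
        constructor
        · intro h; exact ⟨by omega, by omega, h⟩
        · intro h; exact h.2.2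
  rw [e1, e2]
  ring

lemma eq_triple_of_length_three {c : List Int} (h : c.length = 3) :
    ∃ x y z : Int, c = [x, y, z] := by
  rcases c with _ | ⟨x, _ | ⟨y, _ | ⟨z, _ | ⟨w, t⟩⟩⟩⟩ <;> simp_all

-- per-axis characterisations of A's slice sets, on length-3 cubes
lemma sliceX (cubes : List (List Int)) (h3 : ∀ c ∈ cubes, c.length = 3) (v : Int) (p : Int × Int) :
    p ∈ (singleton_dim cubes (some v) none none).getD PySem.Set.empty ↔
      ∃ c ∈ cubes, PySem.List.pyGetD c 0 0 = v ∧ projPair c 0 = p := by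
  simp only [singleton_dim, Option.getD_some, PySem.Set.mem_ofList, List.mem_filterMap]
  constructor
  · rintro ⟨c, hc, hf⟩
    obtain ⟨x, y, z, rfl⟩ := eq_triple_of_length_three (h3 c hc)
    refine ⟨[x, y, z], hc, ?_⟩
    by_cases hx : x = v
    · simp only [if_pos hx] at hf
      refine ⟨by simp [PySem.List.pyGetD_ofNat', hx], ?_⟩
      simp only [Option.some_inj] at hf
      simp [projPair, PySem.List.pyGetD_ofNat', hf]
    · simp [if_neg hx] at hf
  · rintro ⟨c, hc, hk, hp⟩
    obtain ⟨x, y, z, rfl⟩ := eq_triple_of_length_three (h3 c hc)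
    refine ⟨[x, y, z], hc, ?_⟩
    simp only [PySem.List.pyGetD_ofNat', List.getD] at hk
    simp only [projPair, PySem.List.pyGetD_ofNat', List.getD] at hp
    simp_all

lemma sliceY (cubes : List (List Int)) (h3 : ∀ c ∈ cubes, c.length = 3) (v : Int) (p : Int × Int) :
    p ∈ (singleton_dim cubes none (some v) none).getD PySem.Set.empty ↔
      ∃ c ∈ cubes, PySem.List.pyGetD c 1 0 = v ∧ projPair c 1 = p := by
  simp only [singleton_dim, Option.getD_some, PySem.Set.mem_ofList, List.mem_filterMap]
  constructor
  · rintro ⟨c, hc, hf⟩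
    obtain ⟨x, y, z, rfl⟩ := eq_triple_of_length_three (h3 c hc)
    refine ⟨[x, y, z], hc, ?_⟩
    by_cases hy : y = v
    · simp only [if_pos hy] at hf
      refine ⟨by simp [PySem.List.pyGetD_ofNat', hy], ?_⟩
      simp only [Option.some_inj] at hf
      simp [projPair, PySem.List.pyGetD_ofNat', hf]
    · simp [if_neg hy] at hf
  · rintro ⟨c, hc, hk, hp⟩
    obtain ⟨x, y, z, rfl⟩ := eq_triple_of_length_three (h3 c hc)
    refine ⟨[x, y, z], hc, ?_⟩
    simp only [PySem.List.pyGetD_ofNat', List.getD] at hk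
    simp only [projPair, PySem.List.pyGetD_ofNat', List.getD] at hp
    simp_all

lemma sliceZ (cubes : List (List Int)) (h3 : ∀ c ∈ cubes, c.length = 3) (v : Int) (p : Int × Int) :
    p ∈ (singleton_dim cubes none none (some v)).getD PySem.Set.empty ↔
      ∃ c ∈ cubes, PySem.List.pyGetD c 2 0 = v ∧ projPair c 2 = p := by
  simp only [singleton_dim, Option.getD_some, PySem.Set.mem_ofList, List.mem_filterMap]
  constructor
  · rintro ⟨c, hc, hf⟩
    obtain ⟨x, y, z, rfl⟩ := eq_triple_of_length_three (h3 c hc)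
    refine ⟨[x, y, z], hc, ?_⟩
    by_cases hz : z = v
    · simp only [if_pos hz] at hf
      refine ⟨by simp [PySem.List.pyGetD_ofNat', hz], ?_⟩
      simp only [Option.some_inj] at hf
      simp [projPair, PySem.List.pyGetD_ofNat', hf]
    · simp [if_neg hz] at hf
  · rintro ⟨c, hc, hk, hp⟩
    obtain ⟨x, y, z, rfl⟩ := eq_triple_of_length_three (h3 c hc)
    refine ⟨[x, y, z], hc, ?_⟩
    simp only [PySem.List.pyGetD_ofNat', List.getD] at hk
    simp only [projPair, PySem.List.pyGetD_ofNat', List.getD] at hp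
    simp_all

lemma slice_nodup (cubes : List (List Int)) (xc yc zc : Option Int) (h : xc.isSome ∨ yc.isSome ∨ zc.isSome) :
    ((singleton_dim cubes xc yc zc).getD PySem.Set.empty).Nodup := by
  rcases xc with _ | v
  · rcases yc with _ | v
    · rcases zc with _ | v
      · simp at h
      · exact PySem.Set.nodup_ofList _
    · exact PySem.Set.nodup_ofList _
  · exact PySem.Set.nodup_ofList _

-- both sides are 0 when the slice range is empty
lemma empty_range_A (Sl : Int → PySem.Set (Int × Int)) (lo hi : Int)
    (hlt : hi < lo) :
    ((PySem.List.pyRange hi (lo - 1) (-1)).foldl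
        (fun st v => (st.1 + PySem.Set.len (PySem.Set.diff (Sl v) st.2), Sl v))
        (((PySem.List.pyRange lo (hi + 1) 1).foldl
            (fun st v => (st.1 + PySem.Set.len (PySem.Set.diff (Sl v) st.2), Sl v))
            (0, PySem.Set.empty)).1, PySem.Set.empty)).1 = 0 := by
  rw [PySem.List.pyRange_one_eq_nil (by omega), PySem.List.pyRange_neg_one_eq_nil (by omega)]
  simp

-- one axis of the final theorem
lemma axis_case (cubes : List (List Int)) (l : List Int)
    (Sl : Int → PySem.Set (Int × Int)) (axis : Int)
    (hpre : limPre cubes l)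
    (hchar : (∀ c ∈ cubes, c.length = 3) → ∀ v p, p ∈ Sl v ↔
      ∃ c ∈ cubes, PySem.List.pyGetD c axis 0 = v ∧ projPair c axis = p)
    (hnod : ∀ v, (Sl v).Nodup) :
    ((PySem.List.pyRange (PySem.List.pyGetD l 1 0) (PySem.List.pyGetD l 0 0 - 1) (-1)).foldl
        (fun st v => (st.1 + PySem.Set.len (PySem.Set.diff (Sl v) st.2), Sl v))
        (((PySem.List.pyRange (PySem.List.pyGetD l 0 0) (PySem.List.pyGetD l 1 0 + 1) 1).foldl
            (fun st v => (st.1 + PySem.Set.len (PySem.Set.diff (Sl v) st.2), Sl v))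
            (0, PySem.Set.empty)).1, PySem.Set.empty)).1
      = axisCount cubes l axis := by
  by_cases hlt : PySem.List.pyGetD l 1 0 < PySem.List.pyGetD l 0 0
  · rw [axisCount, if_pos hlt]
    exact empty_range_A Sl _ _ hlt
  · rw [axisCount, if_neg hlt]
    have h3 : ∀ c ∈ cubes, c.length = 3 := by
      apply hpre.2
      simp only [PySem.List.pyGetD_ofNat'] at hlt
      omega
    exact branch_eq cubes (fun c => PySem.List.pyGetD c axis 0) (fun c => projPair c axis)
      Sl _ _ (hchar h3) hnod

-- ===== VERDICT (by name: the statement is the Claim_ definition above) =====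
theorem watersheds_spec : Claim_equal_watersheds := by
  intro cubes x_lim y_lim z_lim _ hpre
  unfold Spec_watersheds
  rcases x_lim with _ | l
  · rcases y_lim with _ | l
    · rcases z_lim with _ | l
      · rfl
      · exact axis_case cubes l
          (fun v => (singleton_dim cubes none none (some v)).getD PySem.Set.empty) 2
          (hpre l rfl) (fun h3 => sliceZ cubes h3)
          (fun v => slice_nodup cubes none none (some v) (by simp))
    · exact axis_case cubes l
        (fun v => (singleton_dim cubes none (some v) none).getD PySem.Set.empty) 1
        (hpre l rfl) (fun h3 => sliceY cubes h3)
        (fun v => slice_nodup cubes none (some v) none (by simp))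
  · exact axis_case cubes l
      (fun v => (singleton_dim cubes (some v) none none).getD PySem.Set.empty) 0
      (hpre l rfl) (fun h3 => sliceX cubes h3)
      (fun v => slice_nodup cubes (some v) none none (by simp))
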